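-- pv_equiv track=rewrite | github.com/pcunnin7/Python-Introduction-Assighnments | refactorCelebrity.py | yoda
-- ===== SOURCE A (Python) =====
-- def yoda(quote):
--     out = ''
--     tokens = quote.split(" ")
--     write = False
--     save = ""
--     for count, token in enumerate(tokens):
--         if (write):
--             write = False
--             out = out + token + " " + save
--             if count < len(tokens) - 1:
--                 out = out + " ";
--         else:
--             write = True
--             save = token
--     if write:
--         out = out + save + "\n";
--     return out
-- ===== SOURCE B (Python) =====
-- def yoda(quote):
--     tokens = quote.split(" ")
--     parts = [tokens[i + 1] + " " + tokens[i] for i in range(0, len(tokens) - 1, 2)]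
--     if len(tokens) % 2 == 1:
--         parts.append(tokens[len(tokens) - 1] + "\n")
--     return " ".join(parts)
-- ===== Notes on version B (the rewrite author's own statement) =====
-- stated objective: simpler
-- what changed: Replaced the write/save flag state machine with incremental string concatenation by a pairwise index comprehension (step-2 range) building a list of swapped pairs that is joined once, the odd leftover token (with its terminating newline) appended as a final part.
import Mathlib
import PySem

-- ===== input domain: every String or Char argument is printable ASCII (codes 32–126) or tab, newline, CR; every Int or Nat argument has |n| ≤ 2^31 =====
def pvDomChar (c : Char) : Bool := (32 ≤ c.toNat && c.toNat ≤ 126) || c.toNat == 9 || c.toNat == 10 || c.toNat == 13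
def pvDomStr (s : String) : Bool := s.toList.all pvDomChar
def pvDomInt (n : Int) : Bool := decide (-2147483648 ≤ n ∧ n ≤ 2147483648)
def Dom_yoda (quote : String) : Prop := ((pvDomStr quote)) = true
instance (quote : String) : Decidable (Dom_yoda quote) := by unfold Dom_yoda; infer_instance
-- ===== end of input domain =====

-- B replaces A's write/save state machine and incremental concatenation by a step-2 index
-- comprehension of swapped pairs joined once (objective: simpler).

-- ===== PORT A =====
def yoda (quote : String) : String :=
  let tokens := (PySem.Str.split? quote " ").getD []   -- the separator is a non-empty literal, so split? is `some`
  let st := (PySem.List.enumerate tokens).foldl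
    (fun (st : String × Bool × String) (ct : Int × String) =>
      match st, ct with
      | (out, write, save), (count, token) =>
        if write then
          let out := out ++ token ++ " " ++ save
          let out := if count < (tokens.length : Int) - 1 then out ++ " " else out
          (out, false, save)
        else (out, true, token))
    ("", false, "")
  if st.2.1 then st.1 ++ st.2.2 ++ "\n" else st.1

-- ===== PORT B =====
def yoda_alt (quote : String) : String :=
  let tokens := (PySem.Str.split? quote " ").getD []   -- the separator is a non-empty literal, so split? is `some`
  let parts := (PySem.List.pyRange 0 ((tokens.length : Int) - 1) 2).map
    (fun i => PySem.List.pyGetD tokens (i + 1) "" ++ " " ++ PySem.List.pyGetD tokens i "")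
    -- every i and i+1 drawn from the range is in bounds, so pyGetD's default is never used
  let parts := if tokens.length % 2 == 1
    then parts ++ [PySem.List.pyGetD tokens ((tokens.length : Int) - 1) "" ++ "\n"]
    else parts
  PySem.Str.join " " parts

-- ===== PRECONDITION & SPEC =====
def Spec_yoda (quote : String) (out : String) : Prop := out = yoda_alt quote
instance (quote : String) (out : String) : Decidable (Spec_yoda quote out) := by unfold Spec_yoda; infer_instance

-- ===== CLAIM (what is proved, stated in full; the proofs are below) =====
def Claim_equal_yoda : Prop := ∀ (quote : String), Dom_yoda quote → Spec_yoda quote (yoda quote)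

-- ===== LEMMAS AND PROOFS =====

lemma sempty_app (s : String) : "" ++ s = s := by
  apply String.toList_inj.mp; simp

-- A's loop body and epilogue, abstracted over the captured token count n
def aStep (n : Int) : (String × Bool × String) → (Int × String) → (String × Bool × String) :=
  fun (st : String × Bool × String) (ct : Int × String) =>
    if st.2.1 then
      let out := st.1 ++ ct.2 ++ " " ++ st.2.2
      let out := if ct.1 < n - 1 then out ++ " " else out
      (out, false, st.2.2)
    else (st.1, true, ct.2)

def aFin : (String × Bool × String) → String :=
  fun st => if st.2.1 then st.1 ++ st.2.2 ++ "\n" else st.1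

-- common characterisation of the result on a token list
def ygFull : List String → String
  | [] => ""
  | [a] => a ++ "\n"
  | a :: b :: rest => b ++ " " ++ a ++ (if rest.isEmpty then "" else " " ++ ygFull rest)

def partsSpec : List String → List String
  | [] => []
  | [a] => [a ++ "\n"]
  | a :: b :: rest => (b ++ " " ++ a) :: partsSpec rest

lemma A_loop (n : Int) (ts : List String) : ∀ (i : Int) (out save : String),
    i + ts.length = n →
    aFin ((PySem.List.enumerate ts i).foldl (aStep n) (out, false, save)) = out ++ ygFull ts := by
  induction ts using ygFull.induct with
  | case1 =>
      intro i out save h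
      simp [PySem.List.enumerate, aFin, ygFull]
  | case2 a =>
      intro i out save h
      rw [PySem.List.enumerate_cons]
      simp [PySem.List.enumerate, aStep, aFin, ygFull, String.append_assoc]
  | case3 a b rest ih =>
      intro i out save h
      rw [PySem.List.enumerate_cons, PySem.List.enumerate_cons, List.foldl_cons, List.foldl_cons]
      have s1 : aStep n (out, false, save) (i, a) = (out, true, a) := rfl
      rw [s1]
      simp only [List.length_cons] at h
      push_cast at h
      by_cases hr : rest = []
      · subst hr
        simp only [List.length_nil, Nat.cast_zero] at h
        have s2 : aStep n (out, true, a) (i + 1, b) = (out ++ b ++ " " ++ a, false, a) := by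
          simp [aStep, show ¬ (i + 1 < n - 1) by omega]
        rw [s2]
        simp [PySem.List.enumerate, aFin, ygFull, String.append_assoc]
      · have hlen : 0 < rest.length := by
          cases rest with
          | nil => exact absurd rfl hr
          | cons _ _ => simp
        have s2 : aStep n (out, true, a) (i + 1, b) = (out ++ b ++ " " ++ a ++ " ", false, a) := by
          simp [aStep, show i + 1 < n - 1 by omega]
        rw [s2, ih (i + 1 + 1) (out ++ b ++ " " ++ a ++ " ") a (by omega)]
        have hre : rest.isEmpty = false := by simp [hr]
        simp [ygFull, hre, String.append_assoc]

lemma partsSpec_ne_nil (ts : List String) (h : ts ≠ []) : partsSpec ts ≠ [] := by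
  match ts with
  | [] => exact absurd rfl h
  | [a] => simp [partsSpec]
  | a :: b :: rest => simp [partsSpec]

lemma toList_space : (" " : String).toList = [' '] := by decide

lemma str_join_nil : PySem.Str.join " " [] = "" := by decide

lemma str_join_singleton (p : String) : PySem.Str.join " " [p] = p := by
  apply String.toList_inj.mp
  rw [PySem.Str.toList_join]
  simp [PySem.Chars.join, List.intercalate]

lemma str_join_cons_cons (p q : String) (rest : List String) :
    PySem.Str.join " " (p :: q :: rest) = p ++ " " ++ PySem.Str.join " " (q :: rest) := by
  apply String.toList_inj.mp
  simp [PySem.Str.toList_join, PySem.Chars.join_cons_cons, toList_space]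

lemma join_partsSpec (ts : List String) : PySem.Str.join " " (partsSpec ts) = ygFull ts := by
  induction ts using partsSpec.induct with
  | case1 => simp [partsSpec, ygFull, str_join_nil]
  | case2 a => simp [partsSpec, ygFull, str_join_singleton]
  | case3 a b rest ih =>
      by_cases hr : rest = []
      · subst hr
        simp [partsSpec, ygFull, str_join_singleton]
      · rcases hps : partsSpec rest with _ | ⟨r0, r'⟩
        · exact absurd hps (partsSpec_ne_nil rest hr)
        · have hre : rest.isEmpty = false := by simp [hr]
          calc PySem.Str.join " " (partsSpec (a :: b :: rest))
              = PySem.Str.join " " ((b ++ " " ++ a) :: r0 :: r') := by rw [partsSpec, hps]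
            _ = (b ++ " " ++ a) ++ " " ++ PySem.Str.join " " (r0 :: r') := str_join_cons_cons _ _ _
            _ = (b ++ " " ++ a) ++ " " ++ ygFull rest := by rw [← hps, ih]
            _ = ygFull (a :: b :: rest) := by simp [ygFull, hre, String.append_assoc]

lemma pyGetD_cons2 (a b : String) (rest : List String) (j : Int) (hj : 0 ≤ j) :
    PySem.List.pyGetD (a :: b :: rest) (j + 2) "" = PySem.List.pyGetD rest j "" := by
  rw [PySem.List.pyGetD_of_nonneg _ _ (by omega), PySem.List.pyGetD_of_nonneg _ _ hj]
  have h2 : (j + 2).toNat = j.toNat + 2 := by omega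
  rw [h2]
  rfl

lemma parts_map_eq (ts : List String) :
    ((PySem.List.pyRange 0 ((ts.length : Int) - 1) 2).map
      (fun i => PySem.List.pyGetD ts (i + 1) "" ++ " " ++ PySem.List.pyGetD ts i "")) ++
    (if ts.length % 2 == 1 then [PySem.List.pyGetD ts ((ts.length : Int) - 1) "" ++ "\n"] else [])
    = partsSpec ts := by
  induction ts using partsSpec.induct with
  | case1 =>
      rw [PySem.List.pyRange_of_pos _ _ (by norm_num : (0:Int) < 2)]
      simp [partsSpec]
  | case2 a =>
      rw [PySem.List.pyRange_of_pos _ _ (by norm_num : (0:Int) < 2)]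
      simp [partsSpec, PySem.List.pyGetD_of_nonneg]
  | case3 a b rest ih =>
      rw [PySem.List.pyRange_of_pos _ _ (by norm_num : (0:Int) < 2)] at ih ⊢
      rw [List.map_map] at ih
      have hK : (if (0:Int) < ((a :: b :: rest).length : Int) - 1 then
            ((((a :: b :: rest).length : Int) - 1 - 0 + 2 - 1) / 2).toNat else 0)
          = (if (0:Int) < ((rest.length : Int)) - 1 then
            (((rest.length : Int) - 1 - 0 + 2 - 1) / 2).toNat else 0) + 1 := by
        simp only [List.length_cons]
        push_cast
        split_ifs <;> omega
      have hmod : ((a :: b :: rest).length % 2 == 1) = (rest.length % 2 == 1) := by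
        simp only [List.length_cons]
        have : (rest.length + 1 + 1) % 2 = rest.length % 2 := by omega
        rw [this]
      have hifeq : (if (a :: b :: rest).length % 2 == 1 then
            [PySem.List.pyGetD (a :: b :: rest) (((a :: b :: rest).length : Int) - 1) "" ++ "\n"] else [])
          = (if rest.length % 2 == 1 then
            [PySem.List.pyGetD rest ((rest.length : Int) - 1) "" ++ "\n"] else []) := by
        rw [hmod]
        by_cases hodd : rest.length % 2 == 1
        · rw [if_pos hodd, if_pos hodd]
          have h1 : 1 ≤ rest.length := by
            rcases rest with _ | _
            · simp at hodd
            · simp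
          have e3 : (((a :: b :: rest).length : Int) - 1) = ((rest.length : Int) - 1) + 2 := by
            simp only [List.length_cons]; push_cast; ring
          rw [e3, pyGetD_cons2 _ _ _ _ (by omega)]
        · rw [if_neg hodd, if_neg hodd]
      rw [hK, List.range_succ_eq_map]
      simp only [List.map_cons, List.map_map]
      have hhead : PySem.List.pyGetD (a :: b :: rest) ((0:Int) + 2 * ((0:Nat) : Int) + 1) "" ++ " " ++
          PySem.List.pyGetD (a :: b :: rest) ((0:Int) + 2 * ((0:Nat) : Int)) "" = b ++ " " ++ a := by
        rw [show (0:Int) + 2 * ((0:Nat) : Int) + 1 = 1 by norm_num,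
            show (0:Int) + 2 * ((0:Nat) : Int) = 0 by norm_num,
            PySem.List.pyGetD_of_nonneg _ _ (by norm_num),
            PySem.List.pyGetD_of_nonneg _ _ (by norm_num)]
        rfl
      rw [hhead, hifeq, List.cons_append,
          show partsSpec (a :: b :: rest) = (b ++ " " ++ a) :: partsSpec rest from rfl, ← ih]
      congr 1
      congr 1
      apply List.map_congr_left
      intro k _
      simp only [Function.comp_apply, Nat.succ_eq_add_one]
      have e1 : (0:Int) + 2 * ((k + 1 : Nat) : Int) + 1 = ((0:Int) + 2 * (k : Int) + 1) + 2 := by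
        push_cast; ring
      have e2 : (0:Int) + 2 * ((k + 1 : Nat) : Int) = ((0:Int) + 2 * (k : Int)) + 2 := by
        push_cast; ring
      rw [e1, e2, pyGetD_cons2 _ _ _ _ (by positivity), pyGetD_cons2 _ _ _ _ (by positivity)]

-- ===== VERDICT (by name: the statement is the Claim_ definition above) =====
theorem yoda_spec : Claim_equal_yoda := by
  intro quote _
  show yoda quote = yoda_alt quote
  have hA2 : yoda quote = aFin ((PySem.List.enumerate ((PySem.Str.split? quote " ").getD [])).foldl
      (aStep ((((PySem.Str.split? quote " ").getD []).length : Int))) ("", false, "")) := rfl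
  have hB2 : yoda_alt quote = PySem.Str.join " "
      ((if ((PySem.Str.split? quote " ").getD []).length % 2 == 1
        then ((PySem.List.pyRange 0 ((((PySem.Str.split? quote " ").getD []).length : Int) - 1) 2).map
            (fun i => PySem.List.pyGetD ((PySem.Str.split? quote " ").getD []) (i + 1) "" ++ " " ++
              PySem.List.pyGetD ((PySem.Str.split? quote " ").getD []) i ""))
          ++ [PySem.List.pyGetD ((PySem.Str.split? quote " ").getD [])
              ((((PySem.Str.split? quote " ").getD []).length : Int) - 1) "" ++ "\n"]
        else ((PySem.List.pyRange 0 ((((PySem.Str.split? quote " ").getD []).length : Int) - 1) 2).map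
            (fun i => PySem.List.pyGetD ((PySem.Str.split? quote " ").getD []) (i + 1) "" ++ " " ++
              PySem.List.pyGetD ((PySem.Str.split? quote " ").getD []) i "")))) := rfl
  have hpush : ∀ (c : Bool) (p : List String) (x : String),
      (if c then p ++ [x] else p) = p ++ (if c then [x] else []) := by
    intro c p x; cases c <;> simp
  rw [hA2, hB2, A_loop (((PySem.Str.split? quote " ").getD []).length : Int)
        ((PySem.Str.split? quote " ").getD []) 0 "" "" (by simp),
      sempty_app, hpush, parts_map_eq, join_partsSpec]
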